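-- pv_equiv track=rewrite | github.com/simonhuang/LeetCode | python_solutions/maximum_product_word_length.py | commonLetters
-- ===== SOURCE A (Python) =====
-- def commonLetters(s1, s2):
-- 	letters = set()
-- 	for c in s1:
-- 		letters.add(c)
--
-- 	for c in s2:
-- 		if c in letters:
-- 			return True
--
-- 	return False
-- ===== SOURCE B (Python) =====
-- def commonLetters(s1, s2):
-- 	a = sorted(set(s1))
-- 	b = sorted(set(s2))
-- 	i = 0
-- 	j = 0
-- 	while i < len(a) and j < len(b):
-- 		if a[i] == b[j]:
-- 			return True
-- 		if a[i] < b[j]: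
-- 			i += 1
-- 		else:
-- 			j += 1
-- 	return False
-- ===== Notes on version B (the rewrite author's own statement) =====
-- stated objective: alternative
-- what changed: Replaces the build-a-set-then-scan-with-early-return structure by sorting the two distinct-character lists and running a two-pointer merge scan that advances the pointer with the smaller character until a match or exhaustion.
import Mathlib
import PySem

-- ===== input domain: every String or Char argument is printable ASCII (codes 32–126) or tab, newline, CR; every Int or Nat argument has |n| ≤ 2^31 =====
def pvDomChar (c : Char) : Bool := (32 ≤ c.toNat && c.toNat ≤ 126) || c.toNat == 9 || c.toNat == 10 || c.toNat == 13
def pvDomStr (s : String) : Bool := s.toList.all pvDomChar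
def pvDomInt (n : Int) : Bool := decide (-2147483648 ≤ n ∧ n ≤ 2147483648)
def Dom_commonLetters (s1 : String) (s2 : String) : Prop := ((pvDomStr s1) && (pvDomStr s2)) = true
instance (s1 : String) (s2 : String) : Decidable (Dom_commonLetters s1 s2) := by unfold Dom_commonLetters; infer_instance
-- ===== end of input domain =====

-- B replaces A's populate-a-set-then-scan-with-early-return by a sort-then-two-pointer merge scan; same return value, no speed claim.

-- ===== PORT A =====
-- second loop of A: early-return True on the first c of s2 in letters
def commonLettersScan (letters : PySem.Set Char) : List Char → Bool
  | [] => false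
  | c :: rest => if PySem.Set.contains letters c then true else commonLettersScan letters rest

def commonLetters (s1 : String) (s2 : String) : Bool :=
  commonLettersScan (s1.toList.foldl PySem.Set.add PySem.Set.empty) s2.toList

-- ===== PORT B =====
-- the while loop with indices i, j over a, b: recursion on the unscanned suffixes
def commonLettersMerge : List Char → List Char → Bool
  | [], _ => false
  | _ :: _, [] => false
  | x :: xs, y :: ys =>
    if x = y then true
    else if x < y then commonLettersMerge xs (y :: ys)
    else commonLettersMerge (x :: xs) ys

def commonLetters_alt (s1 : String) (s2 : String) : Bool :=
  commonLettersMerge (PySem.List.sorted (PySem.Set.ofList s1.toList) (fun x => x) false)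
                     (PySem.List.sorted (PySem.Set.ofList s2.toList) (fun x => x) false)

-- ===== PRECONDITION & SPEC =====
def Spec_commonLetters (s1 : String) (s2 : String) (out : Bool) : Prop := out = commonLetters_alt s1 s2
instance (s1 : String) (s2 : String) (out : Bool) : Decidable (Spec_commonLetters s1 s2 out) := by unfold Spec_commonLetters; infer_instance

-- ===== CLAIM (what is proved, stated in full; the proofs are below) =====
def Claim_equal_commonLetters : Prop := ∀ (s1 : String) (s2 : String), Dom_commonLetters s1 s2 → Spec_commonLetters s1 s2 (commonLetters s1 s2)

-- ===== LEMMAS AND PROOFS =====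
theorem scan_eq_any (letters : PySem.Set Char) (l : List Char) :
    commonLettersScan letters l = l.any (fun c => PySem.Set.contains letters c) := by
  induction l with
  | nil => rfl
  | cons c rest ih => simp [commonLettersScan, List.any_cons, ih]

-- the merge scan on strictly increasing lists decides nonemptiness of the intersection
theorem merge_eq_exists (a b : List Char)
    (ha : a.Pairwise (· < ·)) (hb : b.Pairwise (· < ·)) :
    commonLettersMerge a b = decide (∃ x, x ∈ a ∧ x ∈ b) := by
  induction a, b using commonLettersMerge.induct with
  | case1 b => simp [commonLettersMerge]
  | case2 x xs => simp [commonLettersMerge]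
  | case3 xs y ys =>
    simp [commonLettersMerge]
  | case4 x xs y ys hne hlt ih =>
    have ha' := (List.pairwise_cons.mp ha).2
    have hxb : x ∉ y :: ys := by
      intro hx
      rcases List.mem_cons.mp hx with hx | hx
      · exact hne hx
      · have := (List.pairwise_cons.mp hb).1 x hx
        exact absurd hlt (not_lt.mpr this.le)
    rw [commonLettersMerge, if_neg hne, if_pos hlt, ih ha' hb]
    congr 1
    apply propext
    constructor
    · rintro ⟨z, hz1, hz2⟩; exact ⟨z, List.mem_cons_of_mem _ hz1, hz2⟩
    · rintro ⟨z, hz1, hz2⟩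
      rcases List.mem_cons.mp hz1 with hz1 | hz1
      · exact absurd hz2 (hz1 ▸ hxb)
      · exact ⟨z, hz1, hz2⟩
  | case5 x xs y ys hne hnlt ih =>
    have hb' := (List.pairwise_cons.mp hb).2
    have hylt : y < x := by
      rcases lt_trichotomy x y with h | h | h
      · exact absurd h hnlt
      · exact absurd h hne
      · exact h
    have hya : y ∉ x :: xs := by
      intro hy
      rcases List.mem_cons.mp hy with hy | hy
      · exact hne hy.symm
      · have := (List.pairwise_cons.mp ha).1 y hy
        exact absurd hylt (not_lt.mpr this.le)
    rw [commonLettersMerge, if_neg hne, if_neg hnlt, ih ha hb']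
    congr 1
    apply propext
    constructor
    · rintro ⟨z, hz1, hz2⟩; exact ⟨z, hz1, List.mem_cons_of_mem _ hz2⟩
    · rintro ⟨z, hz1, hz2⟩
      rcases List.mem_cons.mp hz2 with hz2 | hz2
      · exact absurd hz1 (hz2 ▸ hya)
      · exact ⟨z, hz1, hz2⟩

-- ===== VERDICT (by name: the statement is the Claim_ definition above) =====
theorem commonLetters_spec : Claim_equal_commonLetters := by
  intro s1 s2 _
  unfold Spec_commonLetters commonLetters commonLetters_alt
  rw [scan_eq_any,
    show List.foldl PySem.Set.add PySem.Set.empty s1.toList = PySem.Set.ofList s1.toList from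
      (PySem.Set.ofList_eq_foldl _).symm,
    merge_eq_exists _ _ (PySem.List.sorted_ofList_pairwise_lt _) (PySem.List.sorted_ofList_pairwise_lt _)]
  rw [Bool.eq_iff_iff]
  simp only [List.any_eq_true, PySem.Set.contains_iff, PySem.List.mem_sorted, PySem.Set.mem_ofList, decide_eq_true_eq]
  constructor
  · rintro ⟨c, hc2, hc1⟩; exact ⟨c, hc1, hc2⟩
  · rintro ⟨c, hc1, hc2⟩; exact ⟨c, hc2, hc1⟩
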